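-- pv_equiv track=rewrite | github.com/myst-6/ukoly | public/assets/code/blockpalindromes/recsol.py | solve
-- ===== SOURCE A (Python) =====
-- def solve(s):
--     if len(s) < 2:
--         return 1
--     answer = 1
--     for i in range(len(s)//2+1):
--         if s[:i] != s[-i:]:
--             continue
--         answer += solve(s[i:-i])
--     return answer
-- ===== SOURCE B (Python) =====
-- def solve(s):
--     n = len(s)
--     half = n // 2
--     g = []  # g[k] holds the count for peel-offset l+1+k
--     for l in range(half, -1, -1):
--         m = n - 2 * l
--         val = 1
--         for i in range(1, m // 2 + 1):
--             if s[l:l+i] == s[n-l-i:n-l]: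
--                 val += g[i-1]
--         g.insert(0, val)
--     return g[0]
-- ===== Notes on version B (the rewrite author's own statement) =====
-- stated objective: alternative
-- what changed: A's memoless recursion over peeled substrings is replaced by a bottom-up dynamic program over the O(n) peel offsets, each state's count computed once from a list of already-computed deeper states; intended as faster (a timing run saw A time out at n=64 where B returned, but could not measure a confirmed ratio at sizes where both finish).
import Mathlib
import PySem

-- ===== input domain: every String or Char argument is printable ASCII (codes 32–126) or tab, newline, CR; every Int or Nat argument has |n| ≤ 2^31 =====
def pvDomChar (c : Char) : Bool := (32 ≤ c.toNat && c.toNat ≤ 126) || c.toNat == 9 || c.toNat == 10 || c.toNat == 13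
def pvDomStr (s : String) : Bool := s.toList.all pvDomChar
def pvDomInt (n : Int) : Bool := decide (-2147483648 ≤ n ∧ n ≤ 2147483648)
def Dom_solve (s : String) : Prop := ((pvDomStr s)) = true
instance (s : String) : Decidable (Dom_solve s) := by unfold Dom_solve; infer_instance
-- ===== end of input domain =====

-- B replaces A's memoless recursion over peeled substrings by a bottom-up DP over the O(n)
-- peel offsets, reading already-computed counts from a list (objective: alternative algorithm).

-- ===== PORT A =====
-- literal transliteration of A; the Nat fuel only makes the recursion structural
-- (it is always sufficient: every recursive call strictly shrinks the string).


def solveAux : Nat → List Char → Int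
  | 0, _ => 1
  | fuel+1, t =>
    if (t.length : Int) < 2 then 1
    else
      (PySem.List.pyRange 0 (PySem.Int.floordiv (t.length : Int) 2 + 1) 1).foldl
        (fun answer i =>
          if PySem.List.slice t none (some i) ≠ PySem.List.slice t (some (-i)) none then
            answer
          else
            answer + solveAux fuel (PySem.List.slice t (some i) (some (-i)))) 1

def solve (s : String) : Int := solveAux (s.toList.length + 1) s.toList

-- ===== PORT B =====
def solve_alt (s : String) : Int :=
  let t := s.toList
  let n : Int := t.length
  let half : Int := PySem.Int.floordiv n 2
  let g : List Int :=
    (PySem.List.pyRange half (-1) (-1)).foldl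
      (fun g l =>
        let m : Int := n - 2 * l
        let val : Int :=
          (PySem.List.pyRange 1 (PySem.Int.floordiv m 2 + 1) 1).foldl
            (fun val i =>
              if PySem.List.slice t (some l) (some (l + i))
                   = PySem.List.slice t (some (n - l - i)) (some (n - l)) then
                val + (PySem.List.pyGet? g (i - 1)).getD 0
              else val) 1
        PySem.List.insert g 0 val) []
  (PySem.List.pyGet? g 0).getD 0

-- ===== PRECONDITION & SPEC =====
def Spec_solve (s : String) (out : Int) : Prop := out = solve_alt s
instance (s : String) (out : Int) : Decidable (Spec_solve s out) := by unfold Spec_solve; infer_instance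

-- ===== CLAIM (what is proved, stated in full; the proofs are below) =====
def Claim_equal_solve : Prop := ∀ (s : String), Dom_solve s → Spec_solve s (solve s)

-- ===== LEMMAS AND PROOFS =====


def pvMid (t : List Char) (l : Nat) : List Char := (t.drop l).take (t.length - 2 * l)

theorem pvSlice_mid (t : List Char) (k : Nat) (hk : 0 < k) (hk2 : k ≤ t.length) :
    PySem.List.slice t (some (k:Int)) (some (-(k:Int))) = (t.drop k).take (t.length - 2*k) := by
  simp [PySem.List.slice, PySem.List.clampIdx_neg_natCast _ _ hk]
  rw [Nat.min_eq_left hk2]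
  congr 1
  omega

theorem pvUnfold (f : Nat) (t : List Char) (h2 : 2 ≤ t.length) :
    solveAux (f+1) t = 1 + ((List.range (t.length/2 + 1)).map (fun k =>
      if 1 ≤ k ∧ t.take k = t.drop (t.length - k) then solveAux f (pvMid t k) else 0)).sum := by
  rw [solveAux]
  rw [if_neg (by exact_mod_cast by omega)]
  rw [show PySem.Int.floordiv (t.length : Int) 2 + 1 = ((t.length/2 + 1 : Nat) : Int) by
        rw [show ((2:Int) = ((2:Nat):Int)) from rfl, PySem.Int.floordiv_natCast]; push_cast; ring]
  rw [PySem.List.pyRange_zero_natCast, List.foldl_map]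
  rw [PySem.List.foldl_congr_mem _ _
      (fun answer k => answer + (if 1 ≤ k ∧ t.take k = t.drop (t.length - k) then solveAux f (pvMid t k) else 0)) 1
      ?_]
  · rw [PySem.List.foldl_add]
  · intro acc k hk
    simp only [List.mem_range] at hk
    by_cases h0 : k = 0
    · subst h0
      have hne : PySem.List.slice t none (some ((0:Nat):Int)) ≠ PySem.List.slice t (some (-((0:Nat):Int))) none := by
        rw [show (-((0:Nat):Int)) = ((0:Nat):Int) by norm_num,
            PySem.List.slice_to_natCast, PySem.List.slice_from_natCast]
        simp only [List.take_zero, List.drop_zero]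
        intro h
        rw [← h] at h2
        simp at h2
      rw [if_pos hne]
      simp
    · have hk1 : 0 < k := Nat.pos_of_ne_zero h0
      rw [PySem.List.slice_to_natCast, PySem.List.slice_from_neg_natCast _ _ hk1,
          pvSlice_mid t k hk1 (by omega)]
      by_cases hc : t.take k = t.drop (t.length - k)
      · rw [if_neg (by simpa using hc)]
        simp [pvMid, hc]
        intro h
        exact absurd h h0
      · rw [if_pos (by simpa using hc)]
        simp [hc]

theorem pvBase (f : Nat) (t : List Char) (h : t.length < 2) : solveAux (f+1) t = 1 := by
  rw [solveAux, if_pos (by exact_mod_cast h)]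

theorem pvMid_length (t : List Char) (k : Nat) : (pvMid t k).length = t.length - 2 * k := by
  simp [pvMid]
  omega

theorem pvStableN : ∀ (N : Nat) (t : List Char), t.length ≤ N → ∀ f1 f2 : Nat,
    t.length / 2 + 1 ≤ f1 → t.length / 2 + 1 ≤ f2 → solveAux f1 t = solveAux f2 t := by
  intro N
  induction N with
  | zero =>
    intro t ht f1 f2 h1 h2
    obtain ⟨a, rfl⟩ : ∃ a, f1 = a + 1 := ⟨f1 - 1, by omega⟩
    obtain ⟨b, rfl⟩ : ∃ b, f2 = b + 1 := ⟨f2 - 1, by omega⟩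
    rw [pvBase a t (by omega), pvBase b t (by omega)]
  | succ N ih =>
    intro t ht f1 f2 h1 h2
    obtain ⟨a, rfl⟩ : ∃ a, f1 = a + 1 := ⟨f1 - 1, by omega⟩
    obtain ⟨b, rfl⟩ : ∃ b, f2 = b + 1 := ⟨f2 - 1, by omega⟩
    by_cases hlen : t.length < 2
    · rw [pvBase a t hlen, pvBase b t hlen]
    · rw [pvUnfold a t (by omega), pvUnfold b t (by omega)]
      congr 1
      apply congrArg
      apply List.map_congr_left
      intro k hkmem
      simp only [List.mem_range] at hkmem
      by_cases hc : 1 ≤ k ∧ t.take k = t.drop (t.length - k)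
      · rw [if_pos hc, if_pos hc]
        have hml := pvMid_length t k
        apply ih (pvMid t k) (by omega) a b (by omega) (by omega)
      · rw [if_neg hc, if_neg hc]

theorem pvStable (t : List Char) (f1 f2 : Nat)
    (h1 : t.length / 2 + 1 ≤ f1) (h2 : t.length / 2 + 1 ≤ f2) :
    solveAux f1 t = solveAux f2 t :=
  pvStableN t.length t le_rfl f1 f2 h1 h2

def pvG (t : List Char) (l : Nat) : Int := solveAux (t.length + 1) (pvMid t l)

theorem pvRange_one (w : Nat) :
    PySem.List.pyRange 1 ((w:Int) + 1) 1 = (List.range w).map (fun k : Nat => (k : Int) + 1) := by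
  simp only [PySem.List.pyRange]
  rw [if_neg (by norm_num)]
  rw [if_pos (by norm_num)]
  by_cases hw : 0 < w
  · rw [if_pos (by exact_mod_cast by omega)]
    have hc : (((w:Int) + 1 - 1 + 1 - 1) / 1).toNat = w := by omega
    rw [hc]
    apply List.map_congr_left
    intro j _; ring
  · have hw0 : w = 0 := by omega
    subst hw0
    rw [if_neg (by norm_num)]
    simp

-- slices of the middle part, expressed on t itself
theorem pvMid_take (t : List Char) (l i : Nat) (h : i ≤ t.length - 2*l) :
    (pvMid t l).take i = (t.drop l).take i := by
  simp [pvMid, List.take_take]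
  omega

theorem pvMid_dropEnd (t : List Char) (l i : Nat) (hl : 2*l ≤ t.length) (h : i ≤ t.length - 2*l) :
    (pvMid t l).drop ((t.length - 2*l) - i) = (t.drop (t.length - l - i)).take i := by
  simp only [pvMid]
  rw [List.drop_take, List.drop_drop]
  have h1 : (t.length - 2*l) - ((t.length-2*l) - i) = i := by omega
  have h2 : l + ((t.length - 2*l) - i) = t.length - l - i := by omega
  rw [h1, h2]

theorem pvMid_mid (t : List Char) (l i : Nat) (hl : 2*l ≤ t.length) :
    pvMid (pvMid t l) i = pvMid t (l + i) := by
  simp only [pvMid]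
  rw [List.drop_take, List.drop_drop, List.take_take, List.length_take, List.length_drop]
  have h1 : min (min (t.length - 2 * l) (t.length - l) - 2 * i) (t.length - 2*l - i) = t.length - 2*(l+i) := by omega
  rw [h1]

theorem pvInnerVal (t : List Char) (l : Nat) (hl : l ≤ t.length / 2) :
    (PySem.List.pyRange 1 (PySem.Int.floordiv ((t.length:Int) - 2*(l:Int)) 2 + 1) 1).foldl
      (fun val i =>
        if PySem.List.slice t (some (l:Int)) (some ((l:Int)+i))
             = PySem.List.slice t (some ((t.length:Int)-(l:Int)-i)) (some ((t.length:Int)-(l:Int))) then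
          val + (PySem.List.pyGet? ((List.range (t.length/2 - l)).map (fun k => pvG t (l+1+k))) (i-1)).getD 0
        else val) 1
    = pvG t l := by
  have h2l : 2*l ≤ t.length := by omega
  have hcast : ((t.length - 2*l : Nat) : Int) = (t.length:Int) - 2*(l:Int) := by omega
  have hfd : PySem.Int.floordiv ((t.length:Int) - 2*(l:Int)) 2 + 1 = ((t.length/2 - l : Nat) : Int) + 1 := by
    rw [← hcast, show ((2:Int)) = ((2:Nat):Int) from rfl, PySem.Int.floordiv_natCast]
    congr 1
    congr 1
    omega
  rw [hfd, pvRange_one, List.foldl_map]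
  have hside : ∀ (acc : Int), ∀ k ∈ List.range (t.length/2 - l),
      (if PySem.List.slice t (some (l:Int)) (some ((l:Int)+((k:Int)+1)))
            = PySem.List.slice t (some ((t.length:Int)-(l:Int)-((k:Int)+1))) (some ((t.length:Int)-(l:Int))) then
          acc + (PySem.List.pyGet? ((List.range (t.length/2 - l)).map (fun k => pvG t (l+1+k))) ((k:Int)+1-1)).getD 0
        else acc)
      = acc + (if (t.drop l).take (k+1) = (t.drop (t.length - l - (k+1))).take (k+1)
         then pvG t (l+1+k) else 0) := by
    intro acc k hk
    simp only [List.mem_range] at hk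
    have hk1 : k + 1 ≤ t.length / 2 - l := by omega
    have e1 : (l:Int) + ((k:Int)+1) = (((l + (k+1)) : Nat) : Int) := by push_cast; ring
    have e2 : (t.length:Int) - (l:Int) - ((k:Int)+1) = ((t.length - l - (k+1) : Nat) : Int) := by omega
    have e3 : (t.length:Int) - (l:Int) = ((t.length - l : Nat) : Int) := by omega
    rw [e1, e2, e3, PySem.List.slice_natCast, PySem.List.slice_natCast]
    have e4 : l + (k+1) - l = k + 1 := by omega
    have e5 : (t.length - l) - (t.length - l - (k+1)) = k + 1 := by omega
    rw [e4, e5]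
    have e6 : ((k:Int) + 1 - 1) = ((k:Nat):Int) := by omega
    rw [e6, PySem.List.pyGet?_natCast]
    have e7 : ((List.range (t.length/2 - l)).map (fun k => pvG t (l+1+k)))[k]? = some (pvG t (l+1+k)) := by
      simp [hk]
    rw [e7]
    by_cases hc : (t.drop l).take (k+1) = (t.drop (t.length - l - (k+1))).take (k+1)
    · rw [if_pos hc, if_pos hc]
      rfl
    · rw [if_neg hc, if_neg hc]
      simp
  rw [PySem.List.foldl_congr_mem _ _
      (fun acc k => acc + (if (t.drop l).take (k+1) = (t.drop (t.length - l - (k+1))).take (k+1)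
         then pvG t (l+1+k) else 0)) 1 hside]
  rw [PySem.List.foldl_add]
  by_cases hsmall : t.length - 2*l < 2
  · have hmh : t.length/2 - l = 0 := by omega
    have : pvG t l = 1 := by
      have hn1 : t.length + 1 = t.length + 1 := rfl
      exact pvBase t.length (pvMid t l) (by rw [pvMid_length]; omega)
    rw [this, hmh]
    simp
  · have hlen : 2 ≤ (pvMid t l).length := by rw [pvMid_length]; omega
    have hG : pvG t l = 1 + ((List.range ((pvMid t l).length/2 + 1)).map (fun i =>
        if 1 ≤ i ∧ (pvMid t l).take i = (pvMid t l).drop ((pvMid t l).length - i)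
        then solveAux t.length (pvMid (pvMid t l) i) else 0)).sum := by
      exact pvUnfold t.length (pvMid t l) hlen
    rw [hG, pvMid_length]
    have hmh : (t.length - 2*l)/2 = t.length/2 - l := by omega
    rw [hmh, List.range_succ_eq_map, List.map_cons, List.map_map]
    simp only [List.sum_cons]
    rw [if_neg (by omega)]
    congr 2
    rw [zero_add]
    refine congrArg List.sum (List.map_congr_left ?_)
    intro k hkmem
    simp only [List.mem_range] at hkmem
    simp only [Function.comp]
    have hki : k + 1 ≤ t.length - 2*l := by omega
    rw [pvMid_take t l (k+1) hki, pvMid_dropEnd t l (k+1) h2l hki, pvMid_mid t l (k+1) h2l]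
    by_cases hc : (t.drop l).take (k+1) = (t.drop (t.length - l - (k+1))).take (k+1)
    · rw [if_pos hc]
      rw [if_pos (show 1 ≤ k.succ ∧ (t.drop l).take (k+1) = (t.drop (t.length - l - (k+1))).take (k+1) from
        ⟨Nat.succ_le_succ (Nat.zero_le k), hc⟩)]
      rw [show l + (k+1) = l+1+k by omega]
      exact pvStable (pvMid t (l+1+k)) (t.length+1) t.length
        (by rw [pvMid_length]; omega) (by rw [pvMid_length]; omega)
    · rw [if_neg hc]
      rw [if_neg (show ¬(1 ≤ k.succ ∧ (t.drop l).take (k+1) = (t.drop (t.length - l - (k+1))).take (k+1)) from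
        fun habs => hc habs.2)]

theorem pvRange_down (k : Nat) :
    PySem.List.pyRange (k : Int) (-1) (-1) = (List.range (k+1)).map (fun j : Nat => (k : Int) - j) := by
  simp only [PySem.List.pyRange]
  rw [if_neg (by norm_num), if_neg (by norm_num), if_pos (by omega : (-1:Int) < (k:Int))]
  have h1 : (- -1 : Int) = 1 := rfl
  have hc : (((k:Int) - -1 + - -1 - 1) / - -1).toNat = k + 1 := by rw [h1]; omega
  rw [hc]
  apply List.map_congr_left
  intro j _; ring

theorem pvInsert_zero (g : List Int) (v : Int) : PySem.List.insert g 0 v = v :: g := by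
  simp [PySem.List.insert, PySem.List.sliceIndices]

theorem pvOuter (t : List Char) (p : Nat) (hp : p ≤ t.length/2 + 1) :
    ((List.range p).map (fun j : Nat => ((t.length/2 : Nat):Int) - j)).foldl
      (fun g l =>
        PySem.List.insert g 0
          ((PySem.List.pyRange 1 (PySem.Int.floordiv ((t.length:Int) - 2*l) 2 + 1) 1).foldl
            (fun val i =>
              if PySem.List.slice t (some l) (some (l+i))
                   = PySem.List.slice t (some ((t.length:Int)-l-i)) (some ((t.length:Int)-l)) then
                val + (PySem.List.pyGet? g (i-1)).getD 0
              else val) 1)) []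
    = (List.range p).map (fun k => pvG t (t.length/2 + 1 - p + k)) := by
  induction p with
  | zero => simp
  | succ p ih =>
    rw [List.range_succ, List.map_append, List.foldl_append, ih (by omega)]
    simp only [List.map_cons, List.map_nil, List.foldl_cons, List.foldl_nil]
    have hple : p ≤ t.length/2 := by omega
    have ecast : ((t.length/2 : Nat):Int) - (p:Int) = (((t.length/2 - p : Nat)):Int) := by omega
    rw [ecast]
    have eglist : (List.range p).map (fun k => pvG t (t.length/2 + 1 - p + k))
        = (List.range (t.length/2 - (t.length/2 - p))).map (fun k => pvG t ((t.length/2 - p) + 1 + k)) := by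
      rw [show t.length/2 - (t.length/2 - p) = p by omega]
      apply List.map_congr_left
      intro k _
      congr 1
      omega
    rw [eglist, pvInnerVal t (t.length/2 - p) (by omega), pvInsert_zero]
    rw [← List.range_succ, List.range_succ_eq_map, List.map_cons, List.map_map]
    rw [show t.length/2 - (t.length/2 - p) = p by omega]
    congr 1
    · congr 1
      omega
    · apply List.map_congr_left
      intro k _
      simp only [Function.comp]
      congr 1
      omega

theorem pvMain (s : String) : solve s = solve_alt s := by
  simp only [solve, solve_alt]
  have hh : PySem.Int.floordiv ((s.toList.length:Int)) 2 = ((s.toList.length/2 : Nat) : Int) := by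
    rw [show ((2:Int)) = ((2:Nat):Int) from rfl, PySem.Int.floordiv_natCast]
  rw [hh, pvRange_down]
  rw [pvOuter s.toList (s.toList.length/2 + 1) le_rfl]
  rw [show ((0:Int)) = ((0:Nat):Int) by norm_num, PySem.List.pyGet?_natCast]
  have e0 : ((List.range (s.toList.length/2 + 1)).map
      (fun k => pvG s.toList (s.toList.length/2 + 1 - (s.toList.length/2 + 1) + k)))[0]?
      = some (pvG s.toList 0) := by
    simp
  rw [e0]
  simp only [Option.getD_some]
  unfold pvG
  congr 1
  simp [pvMid]

-- ===== VERDICT (by name: the statement is the Claim_ definition above) =====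
theorem solve_spec : Claim_equal_solve := by
  intro s _
  unfold Spec_solve
  exact pvMain s
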